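-- pv_equiv track=rewrite | github.com/isLinXu/CVProcessLib | core/math/hx_math.py | find_maxy
-- ===== SOURCE A (Python) =====
-- def find_maxy(y_list, y_value, x_list):
--     finally_pos = 0
--     min_x = 0
--     for i in range(y_list.count(y_value)):
--         next_pos = y_list.index(y_value)
--         x = x_list[finally_pos + next_pos]
--         if min_x < x:
--             min_x = x
--         first_pos = next_pos + 1
--         finally_pos += first_pos
--         y_list = y_list[first_pos:]
--     return min_x
-- ===== SOURCE B (Python) =====
-- def find_maxy(y_list, y_value, x_list):
--     m = 0
--     for i, y in enumerate(y_list):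
--         if y == y_value and m < x_list[i]:
--             m = x_list[i]
--     return m
-- ===== Notes on version B (the rewrite author's own statement) =====
-- stated objective: simpler
-- what changed: replaced the repeated list.count/list.index/slice-rebuild loop with a single enumerate pass that tracks the running maximum x at positions where y equals y_value
import Mathlib
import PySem

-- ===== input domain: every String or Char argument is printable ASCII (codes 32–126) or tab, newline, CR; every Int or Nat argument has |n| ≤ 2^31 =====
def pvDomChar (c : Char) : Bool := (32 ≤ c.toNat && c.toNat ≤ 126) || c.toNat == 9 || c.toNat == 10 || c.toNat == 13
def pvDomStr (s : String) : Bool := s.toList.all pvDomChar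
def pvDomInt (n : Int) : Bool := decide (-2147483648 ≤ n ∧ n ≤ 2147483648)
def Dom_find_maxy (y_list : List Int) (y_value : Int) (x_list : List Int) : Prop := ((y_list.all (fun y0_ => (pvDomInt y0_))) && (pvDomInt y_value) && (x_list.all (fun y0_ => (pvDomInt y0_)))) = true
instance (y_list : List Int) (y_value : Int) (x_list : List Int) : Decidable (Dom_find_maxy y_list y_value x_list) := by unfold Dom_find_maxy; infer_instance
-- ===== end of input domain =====

-- B replaces A's repeated count/index/slice-rebuild loop with a single enumerate
-- pass tracking the running maximum; objective: simpler.

-- ===== PORT A =====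
-- loop body of A: iterates count times; each round finds the next occurrence in the
-- remaining suffix, reads x_list at the cumulative position, and drops past it.
def find_maxy_loop (n : Nat) (y_list : List Int) (y_value : Int) (x_list : List Int)
    (finally_pos min_x : Int) : Int :=
  match n with
  | 0 => min_x
  | Nat.succ k =>
    match PySem.List.index? y_list y_value with
    | none => min_x  -- unreachable: the loop runs exactly count(y_value) times
    | some next_pos =>
      let x := PySem.List.pyGetD x_list (finally_pos + (next_pos : Int)) 0  -- IndexError excluded by Pre_
      let min_x' := if min_x < x then x else min_x
      let first_pos : Int := (next_pos : Int) + 1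
      find_maxy_loop k (PySem.List.slice y_list (some first_pos) none) y_value x_list
        (finally_pos + first_pos) min_x'

def find_maxy (y_list : List Int) (y_value : Int) (x_list : List Int) : Int :=
  find_maxy_loop (PySem.List.count y_list y_value) y_list y_value x_list 0 0

-- ===== PORT B =====
def find_maxy_alt (y_list : List Int) (y_value : Int) (x_list : List Int) : Int :=
  (PySem.List.enumerate y_list 0).foldl
    (fun m p =>
      if p.2 = y_value then
        let x := PySem.List.pyGetD x_list p.1 0  -- IndexError excluded by Pre_
        if m < x then x else m
      else m) 0

-- ===== PRECONDITION & SPEC =====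
-- Pre_ excludes exactly the inputs where Python A raises IndexError: some position
-- holding y_value lies beyond the end of x_list (B raises there too).
def Pre_find_maxy (y_list : List Int) (y_value : Int) (x_list : List Int) : Prop :=
  ∀ i ∈ List.range y_list.length, y_list.getD i 0 = y_value → i < x_list.length
instance (y_list : List Int) (y_value : Int) (x_list : List Int) : Decidable (Pre_find_maxy y_list y_value x_list) := by unfold Pre_find_maxy; infer_instance

def pvWitness_find_maxy : List Int × Int × List Int := ([1, 2, 1], 1, [5, -3, 4])

def Spec_find_maxy (y_list : List Int) (y_value : Int) (x_list : List Int) (out : Int) : Prop := out = find_maxy_alt y_list y_value x_list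
instance (y_list : List Int) (y_value : Int) (x_list : List Int) (out : Int) : Decidable (Spec_find_maxy y_list y_value x_list out) := by unfold Spec_find_maxy; infer_instance

-- ===== CLAIM (what is proved, stated in full; the proofs are below) =====
def Claim_equal_find_maxy : Prop := ∀ (y_list : List Int) (y_value : Int) (x_list : List Int), Dom_find_maxy y_list y_value x_list → Pre_find_maxy y_list y_value x_list → Spec_find_maxy y_list y_value x_list (find_maxy y_list y_value x_list)

-- ===== LEMMAS AND PROOFS =====

-- B's fold step, abbreviated for the lemmas below
def bStep (y_value : Int) (x_list : List Int) (m : Int) (p : Int × Int) : Int :=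
  if p.2 = y_value then
    let x := PySem.List.pyGetD x_list p.1 0
    if m < x then x else m
  else m

lemma alt_eq_fold (y_list : List Int) (y_value : Int) (x_list : List Int) :
    find_maxy_alt y_list y_value x_list =
      (PySem.List.enumerate y_list 0).foldl (bStep y_value x_list) 0 := rfl

-- folding B's step over a stretch with no occurrence leaves the accumulator unchanged
lemma fold_no_match (y_value : Int) (x_list : List Int) :
    ∀ (ys : List Int) (s m : Int), y_value ∉ ys →
      (PySem.List.enumerate ys s).foldl (bStep y_value x_list) m = m := by
  intro ys
  induction ys with
  | nil => intro s m _; simp [PySem.List.enumerate_nil]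
  | cons y ys ih =>
    intro s m h
    rw [PySem.List.enumerate_cons, List.foldl_cons]
    have hy : y ≠ y_value := fun hc => h (by simp [hc])
    have : bStep y_value x_list m (s, y) = m := by simp [bStep, hy]
    rw [this, ih _ m (fun hc => h (List.mem_cons_of_mem _ hc))]

-- main invariant: A's loop on a suffix, fed its exact occurrence count, equals
-- B's fold over that suffix enumerated from the cumulative start position
lemma loop_eq_fold (y_value : Int) (x_list : List Int) :
    ∀ (n : Nat) (ys : List Int), ys.length ≤ n → ∀ (fp m : Int),
      find_maxy_loop (PySem.List.count ys y_value) ys y_value x_list fp m =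
        (PySem.List.enumerate ys fp).foldl (bStep y_value x_list) m := by
  intro n
  induction n with
  | zero =>
    intro ys hys fp m
    have : ys = [] := List.eq_nil_of_length_eq_zero (Nat.le_zero.mp hys)
    subst this
    simp [PySem.List.count_eq, find_maxy_loop, PySem.List.enumerate_nil]
  | succ n ih =>
  intro ys hys fp m
  by_cases hmem : y_value ∈ ys
  · -- ys = pre ++ y_value :: suf, y_value ∉ pre
    obtain ⟨k, hk⟩ := Option.isSome_iff_exists.mp
      ((PySem.List.index?_isSome_iff (xs := ys) (v := y_value)).mpr hmem)
    obtain ⟨pre, suf, hys, hlen, hpre⟩ := (PySem.List.index?_eq_some_iff ys y_value k).mp hk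
    have hcount : PySem.List.count ys y_value = PySem.List.count suf y_value + 1 := by
      subst hys
      simp [PySem.List.count_eq, List.count_append,
        List.count_eq_zero.mpr hpre]
    have hdrop : PySem.List.slice ys (some ((k : Int) + 1)) none = suf := by
      have : ((k : Int) + 1) = ((k + 1 : Nat) : Int) := by push_cast; ring
      rw [this, PySem.List.slice_from_natCast]
      subst hys
      have : pre ++ y_value :: suf = (pre ++ [y_value]) ++ suf := by simp
      rw [this, List.drop_left' (by simp [hlen])]
    have hsuflen : suf.length ≤ n := by
      have : suf.length < ys.length := by rw [hys]; simp; omega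
      omega
    rw [hcount]
    unfold find_maxy_loop
    rw [hk]
    simp only [hdrop]
    rw [ih suf hsuflen (fp + ((k : Int) + 1)) _]
    -- now the B side
    subst hys
    rw [PySem.List.enumerate_append, List.foldl_append,
      fold_no_match y_value x_list pre fp m hpre,
      PySem.List.enumerate_cons, List.foldl_cons]
    have harg : bStep y_value x_list m (fp + (pre.length : Int), y_value) =
        (if m < PySem.List.pyGetD x_list (fp + (k : Int)) 0
         then PySem.List.pyGetD x_list (fp + (k : Int)) 0 else m) := by
      simp [bStep, hlen]
    rw [harg]
    have : fp + (pre.length : Int) + 1 = fp + ((k : Int) + 1) := by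
      rw [hlen]; ring
    rw [this]
  · -- no occurrence: count = 0, and the fold never fires
    have hc : PySem.List.count ys y_value = 0 := by
      simp [PySem.List.count_eq, List.count_eq_zero.mpr hmem]
    rw [hc]
    unfold find_maxy_loop
    exact (fold_no_match y_value x_list ys fp m hmem).symm

-- ===== VERDICT (by name: the statement is the Claim_ definition above) =====
theorem find_maxy_spec : Claim_equal_find_maxy := by
  intro y_list y_value x_list _ _
  unfold Spec_find_maxy find_maxy
  rw [alt_eq_fold, loop_eq_fold y_value x_list y_list.length y_list le_rfl]
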